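-- pv_equiv track=rewrite | github.com/pypi-data/pypi-mirror-227 | packages/natsume/natsume-0.2.0.tar.gz/natsume-0.2.0/natsume/crf.py | letters_half_to_full
-- ===== SOURCE A (Python) =====
-- def letters_half_to_full(text):
--     converted_text = ""
--     offset =  0xFF00 - 0x0020
--     for char in text:
--         if ord(char) >= 0x0041 and ord(char) <= 0x005a:
--             converted_char = chr(ord(char) + offset)
--         elif ord(char) >= 0x0061 and ord(char) <= 0x007a:
--             converted_char = chr(ord(char) + offset)
--         else:
--             converted_char = char
--         converted_text += converted_char
--     return converted_text
-- ===== SOURCE B (Python) =====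
-- def letters_half_to_full(text):
--     offset = 0xFF00 - 0x0020
--     table = {c: c + offset
--              for r in (range(0x41, 0x5B), range(0x61, 0x7B)) for c in r}
--     return text.translate(table)
-- ===== Notes on version B (the rewrite author's own statement) =====
-- stated objective: idiomatic
-- what changed: Builds a 52-entry translation table once over the two letter code-point ranges and applies it in a single str.translate pass, instead of a per-character if/elif chain with string concatenation.
import Mathlib
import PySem

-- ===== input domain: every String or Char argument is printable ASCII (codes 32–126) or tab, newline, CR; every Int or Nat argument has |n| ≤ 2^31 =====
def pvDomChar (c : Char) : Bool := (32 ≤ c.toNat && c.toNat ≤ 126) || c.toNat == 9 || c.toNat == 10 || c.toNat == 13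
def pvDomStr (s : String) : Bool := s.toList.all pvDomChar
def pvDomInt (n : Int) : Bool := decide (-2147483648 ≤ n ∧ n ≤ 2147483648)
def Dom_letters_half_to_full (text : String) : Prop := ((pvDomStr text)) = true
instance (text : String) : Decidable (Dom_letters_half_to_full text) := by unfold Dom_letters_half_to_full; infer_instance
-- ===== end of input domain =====

-- B replaces A's per-character if/elif chain by a translation table built once over the
-- two letter code-point ranges, applied in one str.translate pass (objective: idiomatic).

-- ===== PORT A =====
def letters_half_to_full (text : String) : String :=
  text.toList.foldl
    (fun converted_text char =>
      let converted_char :=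
        if 0x41 ≤ char.toNat ∧ char.toNat ≤ 0x5a then
          Char.ofNat (char.toNat + (0xFF00 - 0x0020))
        else if 0x61 ≤ char.toNat ∧ char.toNat ≤ 0x7a then
          Char.ofNat (char.toNat + (0xFF00 - 0x0020))
        else char
      converted_text.push converted_char)
    ""

-- ===== PORT B =====
-- the dict comprehension over the two code-point ranges
def lhtfTable : PySem.Dict Int Int :=
  (PySem.List.pyRange 0x41 0x5B 1 ++ PySem.List.pyRange 0x61 0x7B 1).foldl
    (fun d c => d.insert c (c + (0xFF00 - 0x0020))) PySem.Dict.empty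

-- str.translate with an int→int table: map each code point through the table, pass through on a miss
def letters_half_to_full_alt (text : String) : String :=
  String.ofList (text.toList.map (fun ch =>
    match lhtfTable.get? (ch.toNat : Int) with
    | some v => Char.ofNat v.toNat
    | none => ch))

-- ===== PRECONDITION & SPEC =====
def Spec_letters_half_to_full (text : String) (out : String) : Prop := out = letters_half_to_full_alt text
instance (text : String) (out : String) : Decidable (Spec_letters_half_to_full text out) := by unfold Spec_letters_half_to_full; infer_instance

-- ===== CLAIM (what is proved, stated in full; the proofs are below) =====
def Claim_equal_letters_half_to_full : Prop := ∀ (text : String), Dom_letters_half_to_full text → Spec_letters_half_to_full text (letters_half_to_full text)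

-- ===== LEMMAS AND PROOFS =====

-- the table lookup, characterised on the code points the domain can contain
set_option maxRecDepth 10000 in
theorem lhtfTable_get (n : Nat) (h : n < 127) :
    lhtfTable.get? (n : Int) =
      if (0x41 ≤ n ∧ n ≤ 0x5a) ∨ (0x61 ≤ n ∧ n ≤ 0x7a) then some ((n : Int) + 0xFEE0)
      else none := by
  revert h; revert n; decide

theorem foldl_push (f : Char → Char) (l : List Char) (s : String) :
    l.foldl (fun acc c => acc.push (f c)) s = s ++ String.ofList (l.map f) := by
  induction l generalizing s with
  | nil => simp
  | cons c t ih =>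
      simp only [List.foldl_cons, List.map_cons, ih]
      apply String.toList_inj.mp
      simp [String.toList_ofList]

-- ===== VERDICT (by name: the statement is the Claim_ definition above) =====
set_option maxRecDepth 10000 in
theorem letters_half_to_full_spec : Claim_equal_letters_half_to_full := by
  intro text hdom
  show _ = _
  unfold letters_half_to_full letters_half_to_full_alt
  rw [foldl_push, String.empty_append]
  congr 1
  apply List.map_congr_left
  intro c hc
  have hdc : pvDomChar c = true := List.all_eq_true.mp hdom c hc
  have hlt : c.toNat < 127 := by
    simp only [pvDomChar, Bool.or_eq_true, Bool.and_eq_true, decide_eq_true_eq, beq_iff_eq] at hdc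
    omega
  rw [lhtfTable_get c.toNat hlt]
  by_cases h1 : 0x41 ≤ c.toNat ∧ c.toNat ≤ 0x5a
  · rw [if_pos h1, if_pos (Or.inl h1)]
    exact congrArg Char.ofNat (by omega)
  · rw [if_neg h1]
    by_cases h2 : 0x61 ≤ c.toNat ∧ c.toNat ≤ 0x7a
    · rw [if_pos h2, if_pos (Or.inr h2)]
      exact congrArg Char.ofNat (by omega)
    · rw [if_neg h2, if_neg (by tauto)]
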